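-- pv_equiv track=rewrite | github.com/benrit/zeissConverter2 | zeissResultLib/__init__.py | updateEntry
-- ===== SOURCE A (Python) =====
-- def updateEntry(entry, data, id):
--     for new_item in data:
--         found = False
--         for x, item in enumerate(entry):
--             if item.get(id) == new_item.get(id):
--                 entry[x].update(new_item)
--                 found = True
--         if found == False:
--             entry.append(new_item)
--
--     return entry
-- ===== SOURCE B (Python) =====
-- # Alternative re-implementation: index entry positions by id-value in a dict of lists,
-- # so each data item is dispatched by one hash lookup instead of scanning entry.
-- # Like A, mutates entry (and, via aliasing, appended data dicts) in place.
-- def updateEntry(entry, data, id):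
--     index = {}
--     for x, item in enumerate(entry):
--         index.setdefault(item.get(id), []).append(x)
--     for new_item in data:
--         key = new_item.get(id)
--         positions = index.get(key)
--         if positions is None:
--             index[key] = [len(entry)]
--             entry.append(new_item)
--         else:
--             for x in positions:
--                 entry[x].update(new_item)
--     return entry
-- ===== Notes on version B (the rewrite author's own statement) =====
-- stated objective: alternative
-- what changed: Replaced A's inner scan of entry for every data item by a dict mapping each id-value to the list of entry positions holding it, built once and extended on append; the per-item dispatch becomes a hash lookup, though the matched updates themselves still dominate on match-heavy inputs.
import Mathlib
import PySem

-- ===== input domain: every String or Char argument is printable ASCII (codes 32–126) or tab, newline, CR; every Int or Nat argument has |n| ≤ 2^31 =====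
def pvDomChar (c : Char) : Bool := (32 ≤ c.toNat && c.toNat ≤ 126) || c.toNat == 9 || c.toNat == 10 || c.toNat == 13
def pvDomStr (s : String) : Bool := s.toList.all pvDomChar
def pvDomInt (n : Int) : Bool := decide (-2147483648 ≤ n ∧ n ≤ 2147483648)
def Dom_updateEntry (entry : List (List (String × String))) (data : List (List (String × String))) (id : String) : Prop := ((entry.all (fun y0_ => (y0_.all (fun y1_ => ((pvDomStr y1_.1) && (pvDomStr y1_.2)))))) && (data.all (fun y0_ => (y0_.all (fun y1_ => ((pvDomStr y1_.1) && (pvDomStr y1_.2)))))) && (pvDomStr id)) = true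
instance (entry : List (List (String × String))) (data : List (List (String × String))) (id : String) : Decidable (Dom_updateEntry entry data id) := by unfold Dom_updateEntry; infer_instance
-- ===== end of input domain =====

-- B replaces A's per-data-item scan of entry by a position index keyed on the id-value (a different algorithm, not measurably faster on match-heavy inputs);
-- like A, the Python B mutates entry (and aliases appended data dicts) in place — equivalence here is about the return value.

-- dicts are association lists; item.get(id) and item.update(new_item) via PySem.Dict
def rget (r : List (String × String)) (k : String) : Option String := (PySem.Dict.mk r).get? k
def rupd (r ni : List (String × String)) : List (String × String) := ((PySem.Dict.mk r).update ni).items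

-- ===== PORT A =====
-- inner 'for x, item in enumerate(entry)' loop: updates every matching position, found = any match
def updateEntryInner (id : String) (ni : List (String × String)) :
    List (List (String × String)) → List (List (String × String)) × Bool
  | [] => ([], false)
  | it :: rest =>
    let r := updateEntryInner id ni rest
    if rget it id == rget ni id then (rupd it ni :: r.1, true) else (it :: r.1, r.2)

def updateEntry (entry : List (List (String × String))) (data : List (List (String × String))) (id : String) : List (List (String × String)) :=
  data.foldl (fun e ni =>
    let p := updateEntryInner id ni e
    if p.2 then p.1 else p.1 ++ [ni]) entry

-- ===== PORT B =====
-- 'for x, item in enumerate(entry): index.setdefault(item.get(id), []).append(x)'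
def buildIx (id : String) : Nat → PySem.Dict (Option String) (List Nat) → List (List (String × String)) → PySem.Dict (Option String) (List Nat)
  | _, ix, [] => ix
  | x, ix, it :: rest => buildIx id (x + 1) (ix.modify (rget it id) [] (fun l => l ++ [x])) rest

-- one iteration of B's 'for new_item in data' loop over the state (entry, index)
def stepB (id : String) (s : List (List (String × String)) × PySem.Dict (Option String) (List Nat))
    (ni : List (String × String)) : List (List (String × String)) × PySem.Dict (Option String) (List Nat) :=
  match s.2.get? (rget ni id) with
  | none => (s.1 ++ [ni], s.2.insert (rget ni id) [s.1.length])
  | some xs => (xs.foldl (fun e x => e.modify x (fun it => rupd it ni)) s.1, s.2)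

def updateEntry_alt (entry : List (List (String × String))) (data : List (List (String × String))) (id : String) : List (List (String × String)) :=
  (data.foldl (stepB id) (entry, buildIx id 0 PySem.Dict.empty entry)).1

-- ===== PRECONDITION & SPEC =====
-- Pre_ excludes rows of data whose association lists carry a duplicate key: such a row represents no Python
-- dict (converting it to a dict collapses the duplicates), so no Python run is modelled on those inputs.
def Pre_updateEntry (entry : List (List (String × String))) (data : List (List (String × String))) (id : String) : Prop :=
  ∀ r ∈ data, (r.map Prod.fst).Nodup
instance (entry : List (List (String × String))) (data : List (List (String × String))) (id : String) : Decidable (Pre_updateEntry entry data id) := by unfold Pre_updateEntry; infer_instance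

def pvWitness_updateEntry : (List (List (String × String))) × (List (List (String × String))) × String :=
  ([[("a", "1")]], [[("a", "2")], [("b", "3")]], "a")

def Spec_updateEntry (entry : List (List (String × String))) (data : List (List (String × String))) (id : String) (out : List (List (String × String))) : Prop := out = updateEntry_alt entry data id
instance (entry : List (List (String × String))) (data : List (List (String × String))) (id : String) (out : List (List (String × String))) : Decidable (Spec_updateEntry entry data id out) := by unfold Spec_updateEntry; infer_instance

-- ===== CLAIM (what is proved, stated in full; the proofs are below) =====
def Claim_equal_updateEntry : Prop := ∀ (entry : List (List (String × String))) (data : List (List (String × String))) (id : String), Dom_updateEntry entry data id → Pre_updateEntry entry data id → Spec_updateEntry entry data id (updateEntry entry data id)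

-- ===== LEMMAS AND PROOFS =====

-- the positions of entry holding id-value k
def idxs (id : String) (e : List (List (String × String))) (k : Option String) : List Nat :=
  (List.range e.length).filter (fun i => rget (e.getD i []) id == k)

-- the index invariant: ix maps k to exactly the positions of e with id-value k (absent iff none)
def InvIx (id : String) (e : List (List (String × String))) (ix : PySem.Dict (Option String) (List Nat)) : Prop :=
  ∀ k, ix.get? k = if idxs id e k = [] then none else some (idxs id e k)

lemma mem_idxs (id : String) (e : List (List (String × String))) (k : Option String) (i : Nat) :
    i ∈ idxs id e k ↔ i < e.length ∧ rget (e.getD i []) id = k := by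
  simp [idxs, List.mem_filter, List.mem_range]

lemma idxs_nodup (id : String) (e : List (List (String × String))) (k : Option String) :
    (idxs id e k).Nodup := (List.nodup_range).filter _

lemma idxs_append_singleton (id : String) (e : List (List (String × String)))
    (a : List (String × String)) (k : Option String) :
    idxs id (e ++ [a]) k = idxs id e k ++ (if rget a id = k then [e.length] else []) := by
  unfold idxs
  rw [List.length_append, List.length_singleton, List.range_succ, List.filter_append]
  congr 1
  · apply List.filter_congr
    intro i hi
    rw [List.mem_range] at hi
    rw [List.getD_eq_getElem?_getD, List.getD_eq_getElem?_getD, List.getElem?_append_left hi]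
  · have hA : (e ++ [a]).getD e.length [] = a := by
      rw [List.getD_eq_getElem?_getD, List.getElem?_concat_length]
      rfl
    simp only [List.filter, hA]
    by_cases h : rget a id = k
    · simp [h]
    · rw [show (rget a id == k) = false from beq_eq_false_iff_ne.2 h]
      simp [h]

lemma innerA_eq (id : String) (ni : List (String × String)) (e : List (List (String × String))) :
    updateEntryInner id ni e =
      (e.map (fun it => if rget it id == rget ni id then rupd it ni else it),
       e.any (fun it => rget it id == rget ni id)) := by
  induction e with
  | nil => simp [updateEntryInner]
  | cons a t ih =>
    simp only [updateEntryInner, ih, List.map_cons, List.any_cons]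
    by_cases h : rget a id == rget ni id <;> simp [h]

lemma get?_mk_none (l : List (String × String)) (id : String) (h : id ∉ l.map Prod.fst) :
    (PySem.Dict.mk l).get? id = none := by
  induction l with
  | nil => rfl
  | cons p t ih =>
    simp only [List.map_cons, List.mem_cons] at h
    push Not at h
    rw [PySem.Dict.get?_mk_cons]
    simp only [beq_iff_eq]
    rw [if_neg (by intro hh; exact h.1 hh.symm)]
    exact ih h.2

lemma get?_update_of_none {d : PySem.Dict String String} {ni : List (String × String)} {id : String}
    (h : (PySem.Dict.mk ni).get? id = none) : (d.update ni).get? id = d.get? id := by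
  induction ni generalizing d with
  | nil => rfl
  | cons p t ih =>
    rw [PySem.Dict.get?_mk_cons] at h
    by_cases hp : p.1 = id
    · simp [hp] at h
    · have h2 : (PySem.Dict.mk t).get? id = none := by
        simpa [beq_iff_eq, hp] using h
      show ((d.insert p.1 p.2).update t).get? id = d.get? id
      rw [ih h2, PySem.Dict.get?_insert_of_ne _ _ (fun hh => hp hh.symm)]

lemma get?_update_of_some {d : PySem.Dict String String} {ni : List (String × String)} {id : String} {v : String}
    (hnd : (ni.map Prod.fst).Nodup) (h : (PySem.Dict.mk ni).get? id = some v) :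
    (d.update ni).get? id = some v := by
  induction ni generalizing d with
  | nil => simp [PySem.Dict.get?] at h
  | cons p t ih =>
    simp only [List.map_cons, List.nodup_cons] at hnd
    rw [PySem.Dict.get?_mk_cons] at h
    by_cases hp : p.1 = id
    · simp only [hp, beq_self_eq_true, if_pos] at h
      have hnone : (PySem.Dict.mk t).get? id = none :=
        get?_mk_none t id (by rw [← hp]; exact hnd.1)
      show ((d.insert p.1 p.2).update t).get? id = some v
      rw [get?_update_of_none hnone, hp, PySem.Dict.get?_insert_self]
      exact congrArg some (Option.some_injective _ h)
    · have h2 : (PySem.Dict.mk t).get? id = some v := by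
        simpa [beq_iff_eq, hp] using h
      exact ih hnd.2 h2

lemma rget_rupd (it ni : List (String × String)) (id : String)
    (hnd : (ni.map Prod.fst).Nodup) (h : rget ni id = rget it id) :
    rget (rupd it ni) id = rget it id := by
  have : rget (rupd it ni) id = ((PySem.Dict.mk it).update ni).get? id := rfl
  rw [this]
  cases hni : rget ni id with
  | none => rw [get?_update_of_none hni]; rfl
  | some v => rw [get?_update_of_some hnd hni, ← h, hni]

lemma foldl_modify_getElem? {α : Type} (f : α → α) (xs : List Nat) (hnd : xs.Nodup)
    (e : List α) (i : Nat) :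
    (xs.foldl (fun e x => e.modify x f) e)[i]? = if i ∈ xs then f <$> e[i]? else e[i]? := by
  induction xs generalizing e with
  | nil => simp
  | cons x t ih =>
    simp only [List.nodup_cons] at hnd
    simp only [List.foldl_cons]
    rw [ih hnd.2]
    rw [List.getElem?_modify]
    by_cases hx : x = i
    · subst hx
      have hxt : x ∉ t := hnd.1
      have hmem : x ∈ x :: t := List.mem_cons_self
      rw [if_neg hxt, if_pos hmem]
      cases e[x]? <;> simp
    · by_cases ht : i ∈ t
      · rw [if_pos ht, if_pos (List.mem_cons_of_mem _ ht)]
        cases e[i]? <;> simp [hx]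
      · have hni : i ∉ x :: t := by
          intro hmem
          rcases List.mem_cons.1 hmem with h1 | h2
          · exact hx h1.symm
          · exact ht h2
        rw [if_neg ht, if_neg hni]
        cases e[i]? <;> simp [hx]

lemma idxs_map_keypreserving (id : String) (e : List (List (String × String)))
    (g : List (String × String) → List (String × String))
    (hg : ∀ it ∈ e, rget (g it) id = rget it id) (k : Option String) :
    idxs id (e.map g) k = idxs id e k := by
  unfold idxs
  rw [List.length_map]
  apply List.filter_congr
  intro i hi
  rw [List.mem_range] at hi
  rw [List.getD_eq_getElem _ _ (by simpa using hi), List.getD_eq_getElem _ _ hi,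
    List.getElem_map, hg _ (List.getElem_mem hi)]

lemma step_eq (id : String) (ni : List (String × String)) (e : List (List (String × String)))
    (ix : PySem.Dict (Option String) (List Nat))
    (hni : (ni.map Prod.fst).Nodup) (hInv : InvIx id e ix) :
    (let p := updateEntryInner id ni e; if p.2 then p.1 else p.1 ++ [ni]) = (stepB id (e, ix) ni).1
    ∧ InvIx id (stepB id (e, ix) ni).1 (stepB id (e, ix) ni).2 := by
  cases hk : ix.get? (rget ni id) with
  | none =>
    have hidx : idxs id e (rget ni id) = [] := by
      have h := hInv (rget ni id); rw [hk] at h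
      by_contra hne
      rw [if_neg hne] at h
      simp at h
    have hnomatch : ∀ it ∈ e, ¬ rget it id = rget ni id := by
      intro it hmem heq
      rcases List.mem_iff_getElem.1 hmem with ⟨i, hi, rfl⟩
      have : i ∈ idxs id e (rget ni id) :=
        (mem_idxs id e _ i).2 ⟨hi, by rw [List.getD_eq_getElem _ _ hi]; exact heq⟩
      rw [hidx] at this
      exact absurd this (List.not_mem_nil)
    have hany : e.any (fun it => rget it id == rget ni id) = false := by
      rw [Bool.eq_false_iff]
      intro h
      rcases List.any_eq_true.1 h with ⟨it, hmem, hit⟩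
      exact hnomatch it hmem (beq_iff_eq.1 hit)
    have hmap : (e.map (fun it => if rget it id == rget ni id then rupd it ni else it)) = e := by
      have := List.map_congr_left (l := e)
        (f := fun it => if rget it id == rget ni id then rupd it ni else it) (g := _root_.id)
        (fun it hmem => by simp [beq_iff_eq, hnomatch it hmem])
      rw [this, List.map_id]
    constructor
    · simp only [innerA_eq, hany, hmap, stepB, hk, Bool.false_eq_true, if_false]
    · intro k'
      simp only [stepB, hk]
      by_cases hkk : k' = rget ni id
      · subst hkk
        rw [PySem.Dict.get?_insert_self, idxs_append_singleton, hidx]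
        simp
      · rw [PySem.Dict.get?_insert_of_ne _ _ hkk, idxs_append_singleton]
        rw [if_neg (show ¬ rget ni id = k' from fun h => hkk h.symm), List.append_nil]
        exact hInv k'
  | some xs =>
    have hne : idxs id e (rget ni id) ≠ [] := by
      intro h0
      have h := hInv (rget ni id); rw [hk, if_pos h0] at h
      simp at h
    have hxs : xs = idxs id e (rget ni id) := by
      have h := hInv (rget ni id); rw [hk, if_neg hne] at h
      exact Option.some_injective _ h
    have hany : e.any (fun it => rget it id == rget ni id) = true := by
      rcases List.exists_mem_of_ne_nil _ hne with ⟨i, hi⟩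
      rcases (mem_idxs id e _ i).1 hi with ⟨hlt, hkey⟩
      refine List.any_eq_true.2 ⟨e[i], List.getElem_mem hlt, ?_⟩
      rw [beq_iff_eq, ← List.getD_eq_getElem e [] hlt]
      exact hkey
    have hg : ∀ it ∈ e, rget ((fun it => if rget it id == rget ni id then rupd it ni else it) it) id
        = rget it id := by
      intro it _
      by_cases h : rget it id = rget ni id
      · have hr := rget_rupd it ni id hni h.symm
        simpa [beq_iff_eq, h] using hr
      · simp [beq_iff_eq, h]
    have hmap : xs.foldl (fun e x => e.modify x (fun it => rupd it ni)) e
        = e.map (fun it => if rget it id == rget ni id then rupd it ni else it) := by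
      apply List.ext_getElem?
      intro i
      rw [foldl_modify_getElem? _ _ (hxs ▸ idxs_nodup id e (rget ni id)) e i, List.getElem?_map]
      cases hlook : e[i]? with
      | none => split <;> simp
      | some it =>
        have hi : i < e.length := by
          by_contra hge
          rw [List.getElem?_eq_none (by omega)] at hlook
          simp at hlook
        have hit : e[i] = it := by
          have h2 := List.getElem?_eq_getElem hi
          rw [hlook] at h2
          exact (Option.some_injective _ h2).symm
        by_cases hc : rget it id = rget ni id
        · have : i ∈ xs := by
            rw [hxs]
            exact (mem_idxs id e _ i).2 ⟨hi, by rw [List.getD_eq_getElem _ _ hi, hit]; exact hc⟩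
          simp [this, beq_iff_eq, hc]
        · have : i ∉ xs := by
            rw [hxs]
            intro hmem
            rcases (mem_idxs id e _ i).1 hmem with ⟨_, hkey⟩
            rw [List.getD_eq_getElem _ _ hi, hit] at hkey
            exact hc hkey
          simp [this, beq_iff_eq, hc]
    constructor
    · simp only [innerA_eq, hany, stepB, hk, if_true, hmap]
    · intro k'
      simp only [stepB, hk, hmap]
      rw [idxs_map_keypreserving id e _ hg k']
      exact hInv k'

lemma foldl_eq (id : String) (data : List (List (String × String))) :
    ∀ (e : List (List (String × String))) (ix : PySem.Dict (Option String) (List Nat)),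
      (∀ r ∈ data, (r.map Prod.fst).Nodup) → InvIx id e ix →
      data.foldl (fun e ni => let p := updateEntryInner id ni e; if p.2 then p.1 else p.1 ++ [ni]) e
        = (data.foldl (stepB id) (e, ix)).1 := by
  induction data with
  | nil => intro e ix _ _; rfl
  | cons ni rest ih =>
    intro e ix hnd hInv
    have h := step_eq id ni e ix (hnd ni List.mem_cons_self) hInv
    simp only [List.foldl_cons]
    rw [h.1]
    have : stepB id (e, ix) ni = ((stepB id (e, ix) ni).1, (stepB id (e, ix) ni).2) := rfl
    rw [this]
    exact ih _ _ (fun r hr => hnd r (List.mem_cons_of_mem _ hr)) h.2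

lemma buildIx_inv (id : String) (rest : List (List (String × String))) :
    ∀ (e : List (List (String × String))) (ix : PySem.Dict (Option String) (List Nat)),
      InvIx id e ix → InvIx id (e ++ rest) (buildIx id e.length ix rest) := by
  induction rest with
  | nil => intro e ix h; simpa using h
  | cons it rest ih =>
    intro e ix hInv
    have hgetD : ix.getD (rget it id) [] = idxs id e (rget it id) := by
      show (ix.get? (rget it id)).getD [] = _
      rw [hInv (rget it id)]
      by_cases h0 : idxs id e (rget it id) = []
      · rw [if_pos h0, h0]; rfl
      · rw [if_neg h0]; rfl
    have hstep : InvIx id (e ++ [it]) (ix.modify (rget it id) [] (fun l => l ++ [e.length])) := by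
      intro k'
      show ((ix.insert (rget it id) ((ix.getD (rget it id) []) ++ [e.length]))).get? k'
        = if idxs id (e ++ [it]) k' = [] then none else some (idxs id (e ++ [it]) k')
      by_cases hkk : k' = rget it id
      · subst hkk
        rw [PySem.Dict.get?_insert_self, hgetD, idxs_append_singleton, if_pos rfl,
          if_neg (by simp)]
      · rw [PySem.Dict.get?_insert_of_ne _ _ hkk, idxs_append_singleton]
        rw [if_neg (show ¬ rget it id = k' from fun h => hkk h.symm), List.append_nil]
        exact hInv k'
    have := ih (e ++ [it]) _ hstep
    rw [List.length_append, List.length_singleton] at this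
    simpa [List.append_assoc] using this

lemma inv_empty (id : String) : InvIx id [] PySem.Dict.empty := by
  intro k
  simp [idxs, PySem.Dict.get?, PySem.Dict.empty]

-- ===== VERDICT (by name: the statement is the Claim_ definition above) =====
theorem updateEntry_spec : Claim_equal_updateEntry := by
  intro entry data id _ hPre
  unfold Spec_updateEntry updateEntry updateEntry_alt
  have hInv : InvIx id entry (buildIx id 0 PySem.Dict.empty entry) := by
    have := buildIx_inv id entry [] PySem.Dict.empty (inv_empty id)
    simpa using this
  exact foldl_eq id data entry _ hPre hInv
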